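-- pv_equiv track=rewrite | github.com/fernandozuher/programming-problems | hackerrank/problem solving/algorithms/2 - implementation/54 - fair rations/fair_rations.py | min_loaves_to_satisfy_rules
-- ===== SOURCE A (Python) =====
-- from itertools import islice
--
-- def min_loaves_to_satisfy_rules(people_loaf_counts):
--     loaves_given = 0
--     counts = people_loaf_counts[0]
--
--     for x in islice(people_loaf_counts, 1, None):
--         if is_odd(counts):
--             loaves_given += 2
--             counts = x + 1
--         else:
--             counts = x
--
--     return -1 if is_odd(counts) else loaves_given
--
-- def is_odd(n):
--     return n % 2 == 1
-- ===== SOURCE B (Python) =====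
-- def min_loaves_to_satisfy_rules(people_loaf_counts):
--     odds = [i for i, v in enumerate(people_loaf_counts) if v % 2 == 1]
--     if len(odds) % 2 == 1:
--         return -1
--     it = iter(odds)
--     total = 0
--     for a, b in zip(it, it):
--         total += 2 * (b - a)
--     return total
-- ===== Notes on version B (the rewrite author's own statement) =====
-- stated objective: alternative
-- what changed: Replaces A's element-by-element scan that carries a running loaf count with collecting the indices of odd entries once and summing 2*(gap) over consecutive index pairs.
import Mathlib
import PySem

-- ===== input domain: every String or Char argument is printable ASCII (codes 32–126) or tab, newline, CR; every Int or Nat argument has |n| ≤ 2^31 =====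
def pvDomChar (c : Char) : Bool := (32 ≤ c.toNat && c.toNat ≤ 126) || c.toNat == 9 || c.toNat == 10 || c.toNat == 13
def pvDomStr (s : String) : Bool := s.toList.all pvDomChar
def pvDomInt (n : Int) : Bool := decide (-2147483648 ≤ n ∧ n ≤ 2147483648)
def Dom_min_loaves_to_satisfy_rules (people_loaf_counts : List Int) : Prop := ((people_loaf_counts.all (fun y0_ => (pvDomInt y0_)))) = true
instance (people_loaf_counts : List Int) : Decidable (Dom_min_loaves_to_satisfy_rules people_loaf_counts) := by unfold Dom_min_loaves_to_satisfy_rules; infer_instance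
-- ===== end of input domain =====

-- B replaces A's element-by-element scan carrying a running loaf count by collecting the
-- indices of odd entries once and summing 2*(distance) over consecutive index pairs
-- (objective: alternative decomposition, same O(n) cost). Return-value equivalence only.

-- ===== PORT A =====
def pvIsOdd (n : Int) : Bool := PySem.Int.mod n 2 == 1

def pvALoop (counts loaves_given : Int) : List Int → Int
  | [] => if pvIsOdd counts then -1 else loaves_given
  | x :: rest =>
      if pvIsOdd counts then pvALoop (x + 1) (loaves_given + 2) rest
      else pvALoop x loaves_given rest

def min_loaves_to_satisfy_rules (people_loaf_counts : List Int) : Int :=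
  match PySem.List.pyGet? people_loaf_counts 0 with
  | none => 0  -- people_loaf_counts[0]: Python raises IndexError here; excluded by Pre_
  | some counts => pvALoop counts 0 (PySem.List.slice people_loaf_counts (some 1) none)

-- ===== PORT B =====
-- the "for a, b in zip(it, it)" pair loop over odds; zip ignores a trailing unpaired
-- element (that case is unreachable under the even-length guard)
def pvPairLoop (total : Int) : List Int → Int
  | [] => total
  | [_] => total
  | a :: b :: rest => pvPairLoop (total + 2 * (b - a)) rest

def min_loaves_to_satisfy_rules_alt (people_loaf_counts : List Int) : Int :=
  let odds := ((PySem.List.enumerate people_loaf_counts).filter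
      (fun p => PySem.Int.mod p.2 2 == 1)).map (fun p => p.1)
  if odds.length % 2 == 1 then -1 else pvPairLoop 0 odds

-- ===== PRECONDITION & SPEC =====
-- Pre_ excludes only the empty list, on which A raises IndexError at its first indexing step.
def Pre_min_loaves_to_satisfy_rules (people_loaf_counts : List Int) : Prop :=
  people_loaf_counts ≠ []
instance (people_loaf_counts : List Int) : Decidable (Pre_min_loaves_to_satisfy_rules people_loaf_counts) := by unfold Pre_min_loaves_to_satisfy_rules; infer_instance

def pvWitness_min_loaves_to_satisfy_rules : List Int := [2, 3, 4, 5, 6]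

def Spec_min_loaves_to_satisfy_rules (people_loaf_counts : List Int) (out : Int) : Prop := out = min_loaves_to_satisfy_rules_alt people_loaf_counts
instance (people_loaf_counts : List Int) (out : Int) : Decidable (Spec_min_loaves_to_satisfy_rules people_loaf_counts out) := by unfold Spec_min_loaves_to_satisfy_rules; infer_instance

-- ===== CLAIM (what is proved, stated in full; the proofs are below) =====
def Claim_equal_min_loaves_to_satisfy_rules : Prop := ∀ (people_loaf_counts : List Int), Dom_min_loaves_to_satisfy_rules people_loaf_counts → Pre_min_loaves_to_satisfy_rules people_loaf_counts → Spec_min_loaves_to_satisfy_rules people_loaf_counts (min_loaves_to_satisfy_rules people_loaf_counts)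

-- ===== LEMMAS AND PROOFS =====

-- indices (counted from k) of the odd entries of the list
def pvOddsFrom (k : Int) : List Int → List Int
  | [] => []
  | x :: r => if pvIsOdd x then k :: pvOddsFrom (k + 1) r else pvOddsFrom (k + 1) r

theorem pvIsOdd_emod (x : Int) : pvIsOdd x = (x % 2 == 1) := by
  rw [pvIsOdd, PySem.Int.mod_eq_emod_of_pos (by norm_num)]

theorem pvIsOdd_succ (x : Int) : pvIsOdd (x + 1) = !pvIsOdd x := by
  rw [pvIsOdd_emod, pvIsOdd_emod]
  rcases Int.emod_two_eq x with h | h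
  · have h1 : (x + 1) % 2 = 1 := by omega
    simp [h, h1]
  · have h1 : (x + 1) % 2 = 0 := by omega
    simp [h, h1]

theorem pvOddsFrom_eq_enum (l : List Int) : ∀ (k : Int),
    ((PySem.List.enumerate l k).filter (fun p => PySem.Int.mod p.2 2 == 1)).map
      (fun p => p.1) = pvOddsFrom k l := by
  induction l with
  | nil => intro k; rfl
  | cons x r ih =>
      intro k
      have he : PySem.List.enumerate (x :: r) k = (k, x) :: PySem.List.enumerate r (k + 1) := by
        simp [PySem.List.enumerate]
      rw [he, List.filter_cons]
      rw [show (PySem.Int.mod (k, x).2 2 == 1) = pvIsOdd x from rfl, pvOddsFrom]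
      cases h : pvIsOdd x
      · rw [if_neg (by simp), if_neg (by simp), ih]
      · rw [if_pos rfl, if_pos rfl, List.map_cons, ih]

theorem pvOddsFrom_shift (l : List Int) : ∀ (k c : Int),
    pvOddsFrom (k + c) l = (pvOddsFrom k l).map (· + c) := by
  induction l with
  | nil => intro k c; rfl
  | cons x r ih =>
      intro k c
      cases h : pvIsOdd x <;>
        simp [pvOddsFrom, h, show k + c + 1 = (k + 1) + c by ring, ih]

theorem pvOddsFrom_eq (l : List Int) (k : Int) :
    pvOddsFrom k l = (pvOddsFrom 0 l).map (· + k) := by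
  simpa using pvOddsFrom_shift l 0 k

theorem pvPairLoop_acc : ∀ (o : List Int) (t : Int),
    pvPairLoop t o = t + pvPairLoop 0 o
  | [], t => by simp [pvPairLoop]
  | [a], t => by simp [pvPairLoop]
  | a :: b :: r, t => by
      simp only [pvPairLoop]
      rw [pvPairLoop_acc r (t + 2 * (b - a)), pvPairLoop_acc r (0 + 2 * (b - a))]
      ring

theorem pvPairLoop_map_add : ∀ (o : List Int) (c : Int),
    pvPairLoop 0 (o.map (· + c)) = pvPairLoop 0 o
  | [], c => rfl
  | [a], c => rfl
  | a :: b :: r, c => by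
      simp only [List.map_cons, pvPairLoop]
      rw [pvPairLoop_acc (r.map (· + c)), pvPairLoop_acc r, pvPairLoop_map_add r c]
      ring

-- the heart of the equivalence: A's scan computes B's pair-sum over odd indices
theorem pvMain : ∀ (t : List Int) (c g : Int),
    pvALoop c g t =
      if (pvOddsFrom 0 (c :: t)).length % 2 == 1 then -1
      else g + pvPairLoop 0 (pvOddsFrom 0 (c :: t)) := by
  intro t
  induction t with
  | nil =>
      intro c g
      cases h : pvIsOdd c <;> simp [pvALoop, pvOddsFrom, pvPairLoop, h]
  | cons x r ih =>
      intro c g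
      by_cases hc : pvIsOdd c
      · -- counts odd: give 2 loaves, next counts = x + 1
        rw [pvALoop, if_pos hc, ih (x + 1) (g + 2)]
        by_cases hx : pvIsOdd x
        · -- x odd, so x + 1 even
          have hx1 : pvIsOdd (x + 1) = false := by rw [pvIsOdd_succ, hx]; rfl
          simp only [pvOddsFrom, hc, hx, hx1, if_true, Bool.false_eq_true, if_false]
          rw [pvOddsFrom_eq r (0 + 1 + 1), pvOddsFrom_eq r (0 + 1)]
          by_cases hlen : (pvOddsFrom 0 r).length % 2 = 1
          · rw [if_pos (by simp only [List.length_map, beq_iff_eq]; omega),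
                if_pos (by simp only [List.length_cons, List.length_map, beq_iff_eq]; omega)]
          · rw [if_neg (by simp only [List.length_map, beq_iff_eq]; omega),
                if_neg (by simp only [List.length_cons, List.length_map, beq_iff_eq]; omega)]
            simp only [pvPairLoop]
            rw [pvPairLoop_map_add, pvPairLoop_acc ((pvOddsFrom 0 r).map (· + (0 + 1 + 1))),
                pvPairLoop_map_add]
            ring
        · -- x even, so x + 1 odd
          have hx' : pvIsOdd x = false := by simpa using hx
          have hx1 : pvIsOdd (x + 1) = true := by rw [pvIsOdd_succ, hx']; rfl
          simp only [pvOddsFrom, hc, hx', hx1, if_true, Bool.false_eq_true, if_false]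
          rw [pvOddsFrom_eq r (0 + 1 + 1), pvOddsFrom_eq r (0 + 1)]
          rcases hr : pvOddsFrom 0 r with _ | ⟨b, o'⟩
          · -- both index lists are [0]: odd length, both sides -1
            simp
          · rw [hr] at *
            by_cases hlen : o'.length % 2 = 1
            · rw [if_pos (by simp only [List.length_cons, List.length_map, beq_iff_eq]; omega),
                  if_pos (by simp only [List.length_cons, List.length_map, beq_iff_eq]; omega)]
            · rw [if_neg (by simp only [List.length_cons, List.length_map, beq_iff_eq]; omega),
                  if_neg (by simp only [List.length_cons, List.length_map, beq_iff_eq]; omega)]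
              simp only [List.map_cons, pvPairLoop]
              rw [pvPairLoop_acc (o'.map (· + (0 + 1 + 1))), pvPairLoop_map_add o',
                  pvPairLoop_acc (o'.map (· + (0 + 1))), pvPairLoop_map_add o']
              ring
      · -- counts even: pass to x unchanged
        rw [pvALoop, if_neg hc, ih x g]
        have hc' : pvIsOdd c = false := by simpa using hc
        have hshift : pvOddsFrom 0 (c :: x :: r) = (pvOddsFrom 0 (x :: r)).map (· + 1) := by
          rw [pvOddsFrom, if_neg (by simp [hc']), pvOddsFrom_eq (x :: r) (0 + 1)]
          norm_num
        rw [hshift, List.length_map, pvPairLoop_map_add]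

-- ===== VERDICT (by name: the statement is the Claim_ definition above) =====
theorem min_loaves_to_satisfy_rules_spec : Claim_equal_min_loaves_to_satisfy_rules := by
  intro l _ hpre
  rcases l with _ | ⟨c, t⟩
  · exact absurd rfl hpre
  · show min_loaves_to_satisfy_rules (c :: t) = min_loaves_to_satisfy_rules_alt (c :: t)
    have hget : PySem.List.pyGet? (c :: t) 0 = some c := by
      simp [PySem.List.pyGet?, PySem.List.pyIdx?]
    have hslice : PySem.List.slice (c :: t) (some 1) none = t := by
      rw [PySem.List.slice_from (c :: t) (by norm_num)]; rfl
    have hB : min_loaves_to_satisfy_rules_alt (c :: t) =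
        if (pvOddsFrom 0 (c :: t)).length % 2 == 1 then -1
        else pvPairLoop 0 (pvOddsFrom 0 (c :: t)) := by
      simp only [min_loaves_to_satisfy_rules_alt, pvOddsFrom_eq_enum (c :: t) 0]
    rw [min_loaves_to_satisfy_rules, hget, hslice, hB]
    simpa only [zero_add] using pvMain t c 0
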